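-- pv_equiv track=rewrite | github.com/mxlilly-ship-it/friday-night-dynasty | backend/services/league_service.py | _stem_variants_for_logo_match
-- ===== SOURCE A (Python) =====
-- from typing import Any, Dict, List, Optional, Tuple
--
-- def _stem_variants_for_logo_match(stem: str) -> List[str]:
--     """Try filename stems with common suffixes stripped (e.g. Martinsburg_logo → Martinsburg)."""
--     stem = str(stem or "").strip()
--     if not stem:
--         return []
--     variants: List[str] = [stem]
--     for suffix in ("_logo", "-logo", "_LOGO", "-LOGO", " logo"):
--         if len(stem) > len(suffix) and stem.lower().endswith(suffix.lower()):
--             variants.append(stem[: -len(suffix)].strip())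
--     out: List[str] = []
--     seen = set()
--     for v in variants:
--         if v and v not in seen:
--             seen.add(v)
--             out.append(v)
--     return out
-- ===== SOURCE B (Python) =====
-- from typing import List
--
-- def _stem_variants_for_logo_match(stem: str) -> List[str]:
--     """All five suffixes have length 5 and lowercase to one of three forms, so a
--     single tail check replaces the suffix loop and the seen-set dedup pass."""
--     s = str(stem or "").strip()
--     if not s:
--         return []
--     if len(s) > 5 and s[-5:].lower() in ("_logo", "-logo", " logo"):
--         t = s[:-5].strip()
--         if t:
--             return [s, t]
--     return [s]
-- ===== Notes on version B (the rewrite author's own statement) =====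
-- stated objective: simpler
-- what changed: Replaces the five-suffix loop plus the seen-set dedup pass with a single guard on the lowercased last five characters (all five suffixes have length 5 and only three distinct lowercase forms), building the at-most-two-element result directly.
import Mathlib
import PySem

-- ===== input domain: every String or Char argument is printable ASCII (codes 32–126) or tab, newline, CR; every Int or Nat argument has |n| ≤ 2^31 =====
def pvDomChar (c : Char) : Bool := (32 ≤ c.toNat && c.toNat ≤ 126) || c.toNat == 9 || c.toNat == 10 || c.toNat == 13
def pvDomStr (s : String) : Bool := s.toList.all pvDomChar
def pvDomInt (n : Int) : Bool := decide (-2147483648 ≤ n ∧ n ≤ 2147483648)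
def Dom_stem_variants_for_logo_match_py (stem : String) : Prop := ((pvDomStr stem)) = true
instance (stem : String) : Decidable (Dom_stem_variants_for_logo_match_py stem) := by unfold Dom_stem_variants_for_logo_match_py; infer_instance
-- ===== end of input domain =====

-- B replaces A's five-suffix loop plus seen-set dedup pass with one guard on the
-- lowercased last five characters; same return value, simpler decomposition.

-- ===== PORT A =====
def stem_variants_for_logo_match_py (stem : String) : List String :=
  let stem := PySem.Str.strip stem
  if stem = "" then []
  else
    let variants : List String :=
      ["_logo", "-logo", "_LOGO", "-LOGO", " logo"].foldl
        (fun variants sfx =>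
          if PySem.Str.len stem > PySem.Str.len sfx
             ∧ PySem.Str.endswith (PySem.Str.lower stem) (PySem.Str.lower sfx) = true
          then variants ++ [PySem.Str.strip (PySem.Str.slice stem none (some (-(PySem.Str.len sfx))))]
          else variants)
        [stem]
    (variants.foldl
      (fun (acc : List String × PySem.Set String) v =>
        if v ≠ "" ∧ acc.2.contains v = false then (acc.1 ++ [v], acc.2.add v) else acc)
      ([], PySem.Set.empty)).1

-- ===== PORT B =====
def stem_variants_for_logo_match_py_alt (stem : String) : List String :=
  let s := PySem.Str.strip stem
  if s = "" then []
  else if PySem.Str.len s > 5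
          ∧ PySem.Str.lower (PySem.Str.slice s (some (-5)) none) ∈ (["_logo", "-logo", " logo"] : List String)
  then
    let t := PySem.Str.strip (PySem.Str.slice s none (some (-5)))
    if t ≠ "" then [s, t] else [s]
  else [s]

-- ===== PRECONDITION & SPEC =====
def Spec_stem_variants_for_logo_match_py (stem : String) (out : List String) : Prop := out = stem_variants_for_logo_match_py_alt stem
instance (stem : String) (out : List String) : Decidable (Spec_stem_variants_for_logo_match_py stem out) := by unfold Spec_stem_variants_for_logo_match_py; infer_instance

-- ===== CLAIM (what is proved, stated in full; the proofs are below) =====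
def Claim_equal_stem_variants_for_logo_match_py : Prop := ∀ (stem : String), Dom_stem_variants_for_logo_match_py stem → Spec_stem_variants_for_logo_match_py stem (stem_variants_for_logo_match_py stem)

-- ===== LEMMAS AND PROOFS =====

-- stripping never lengthens a list of characters
theorem strip_len_le (l : List Char) : (PySem.Chars.strip l).length ≤ l.length := by
  simp only [PySem.Chars.strip, PySem.Chars.rstrip, PySem.Chars.lstrip, List.length_reverse]
  calc (List.dropWhile PySem.Chars.isspace (List.dropWhile PySem.Chars.isspace l).reverse).length
      ≤ (List.dropWhile PySem.Chars.isspace l).reverse.length := List.length_dropWhile_le _ _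
    _ ≤ l.length := by simpa using List.length_dropWhile_le PySem.Chars.isspace l

-- the stripped prefix s[:-5].strip() is strictly shorter than s, hence never equal to it
theorem t_ne_s (s : String) (h : 5 < s.toList.length) :
    PySem.Str.strip (PySem.Str.slice s none (some (-5))) ≠ s := by
  intro he
  have h2 := congrArg (fun x : String => x.toList.length) he
  simp only [PySem.Str.toList_strip, PySem.Str.toList_slice,
    PySem.Chars.slice_eq_listSlice, PySem.List.slice_to_neg_ofNat s.toList 5 (by omega)] at h2
  have h3 := strip_len_le (List.take (s.toList.length - 5) s.toList)
  simp only [List.length_take] at h3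
  omega

-- A's test s.lower().endswith(u), for a length-5 u, is equality of the lowercased last 5 chars
theorem endswith_lower5 (s u : String) (hu : u.toList.length = 5) :
    (PySem.Str.endswith (PySem.Str.lower s) u = true)
      ↔ PySem.Chars.lower (s.toList.drop (s.toList.length - 5)) = u.toList := by
  rw [show PySem.Str.endswith (PySem.Str.lower s) u
        = PySem.Chars.endswith (PySem.Chars.lower s.toList) u.toList by
      simp [PySem.Str.endswith, PySem.Str.lower]]
  rw [PySem.Chars.endswith_iff, List.suffix_iff_eq_drop]
  unfold PySem.Chars.lower
  simp [hu, eq_comm]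

-- B's test s[-5:].lower() == u in the same canonical form
theorem lower_slice_eq (s u : String) :
    (PySem.Str.lower (PySem.Str.slice s (some (-5)) none) = u)
      ↔ PySem.Chars.lower (s.toList.drop (s.toList.length - 5)) = u.toList := by
  rw [String.ext_iff]
  simp only [PySem.Str.toList_lower, PySem.Str.toList_slice, PySem.Chars.slice_eq_listSlice,
    PySem.List.slice_from_neg_ofNat s.toList 5 (by omega)]

-- ===== VERDICT (by name: the statement is the Claim_ definition above) =====
theorem stem_variants_for_logo_match_py_spec : Claim_equal_stem_variants_for_logo_match_py := by
  intro stem _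
  unfold Spec_stem_variants_for_logo_match_py stem_variants_for_logo_match_py
    stem_variants_for_logo_match_py_alt
  generalize PySem.Str.strip stem = s
  by_cases hs : s = ""
  · simp [hs]
  · simp only [if_neg hs]
    have e1 : PySem.Str.len "_logo" = 5 := by decide
    have e2 : PySem.Str.len "-logo" = 5 := by decide
    have e3 : PySem.Str.len "_LOGO" = 5 := by decide
    have e4 : PySem.Str.len "-LOGO" = 5 := by decide
    have e5 : PySem.Str.len " logo" = 5 := by decide
    have f1 : PySem.Str.lower "_logo" = "_logo" := by decide
    have f2 : PySem.Str.lower "-logo" = "-logo" := by decide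
    have f3 : PySem.Str.lower "_LOGO" = "_logo" := by decide
    have f4 : PySem.Str.lower "-LOGO" = "-logo" := by decide
    have f5 : PySem.Str.lower " logo" = " logo" := by decide
    have H1 := endswith_lower5 s "_logo" (by decide)
    have H2 := endswith_lower5 s "-logo" (by decide)
    have H3 := endswith_lower5 s " logo" (by decide)
    simp only [List.foldl_cons, List.foldl_nil, e1, e2, e3, e4, e5, f1, f2, f3, f4, f5,
      H1, H2, H3, lower_slice_eq, List.mem_cons, List.not_mem_nil, or_false]
    by_cases hlen : PySem.Str.len s > 5
    · have hlen' : 5 < s.toList.length := by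
        rw [PySem.Str.len_eq] at hlen; exact_mod_cast hlen
      have hst := t_ne_s s hlen'
      by_cases h1 : PySem.Chars.lower (List.drop (s.length - 5) s.toList) = ['_', 'l', 'o', 'g', 'o'] <;>
      by_cases h2 : PySem.Chars.lower (List.drop (s.length - 5) s.toList) = ['-', 'l', 'o', 'g', 'o'] <;>
      by_cases h3 : PySem.Chars.lower (List.drop (s.length - 5) s.toList) = [' ', 'l', 'o', 'g', 'o'] <;>
      by_cases htt : PySem.Str.strip (PySem.Str.slice s none (some (-5))) = "" <;>
      simp_all [PySem.Set.add, PySem.Set.contains, PySem.Set.empty]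
    · simp only [show (PySem.Str.len s > 5) = False from eq_false hlen, false_and, if_false]
      simp [hs, PySem.Set.add, PySem.Set.contains, PySem.Set.empty]
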